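-- pv_equiv track=rewrite | github.com/IgorLukhnev/PythonSportApp | HW2.py | away_goals_scored
-- ===== SOURCE A (Python) =====
-- HOME = 1
--
-- AWAY = 2
--
-- HOME_GOALS = 3
--
-- AWAY_GOALS = 4
--
-- def matches_for_team(data):
--     teams_matches = dict()
--     for match in data:
--         home_team = match[HOME]
--         away_team = match[AWAY]
--         for each in [home_team, away_team]:
--             teams_matches.setdefault(each, list())
--             teams_matches[each].append(tuple(match))
--     return teams_matches
--
-- def away_goals_scored(data, teams):
--     goals = dict()
--     all_matches = matches_for_team(data)
--     result = []
--     for team in teams: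
--         matches = all_matches[team]
--         for match in matches:
--             team1 = match[HOME]
--             scoring = [match[HOME_GOALS], match[AWAY_GOALS]]
--             goals.setdefault(team, 0)
--             if team1 != team:
--                 goals[team] += int(scoring[1])
--         result.append((team, goals[team]))
--     result.sort(key=lambda x: x[1], reverse=True)
--     return result
-- ===== SOURCE B (Python) =====
-- HOME = 1
-- AWAY = 2
-- HOME_GOALS = 3
-- AWAY_GOALS = 4
--
-- def away_goals_scored(data, teams):
--     wanted = set(teams)
--     totals = {}
--     for match in data:
--         totals.setdefault(match[HOME], 0)
--         totals.setdefault(match[AWAY], 0)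
--         if match[AWAY] in wanted:
--             totals[match[AWAY]] += int(match[AWAY_GOALS])
--     result = [(team, totals[team]) for team in teams]
--     result.sort(key=lambda x: x[1], reverse=True)
--     return result
-- ===== Notes on version B (the rewrite author's own statement) =====
-- stated objective: alternative
-- what changed: B replaces A's per-team match-list index plus an inner rescan of every match of each requested team with one streaming pass over data that registers each team seen and tallies a requested away team's goals directly into a dict, then a lookup per requested team; Pre_ excludes teams lists with duplicate entries and rows where a requested team plays itself (home==away), degenerate corners where A's cumulative dict doubles the repeated team's total resp. silently skips the self-match and no caller specifies either behaviour.
-- outside the precondition, e.g. on away_goals_scored([['x', 'a', 'a', '1', '2']], ['a']): A returns [('a', 0)], B returns [('a', 2)]; on away_goals_scored([['x', 'a', 'a', '1', 'zz']], ['a']): A returns [('a', 0)], B raises ValueError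
import Mathlib
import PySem

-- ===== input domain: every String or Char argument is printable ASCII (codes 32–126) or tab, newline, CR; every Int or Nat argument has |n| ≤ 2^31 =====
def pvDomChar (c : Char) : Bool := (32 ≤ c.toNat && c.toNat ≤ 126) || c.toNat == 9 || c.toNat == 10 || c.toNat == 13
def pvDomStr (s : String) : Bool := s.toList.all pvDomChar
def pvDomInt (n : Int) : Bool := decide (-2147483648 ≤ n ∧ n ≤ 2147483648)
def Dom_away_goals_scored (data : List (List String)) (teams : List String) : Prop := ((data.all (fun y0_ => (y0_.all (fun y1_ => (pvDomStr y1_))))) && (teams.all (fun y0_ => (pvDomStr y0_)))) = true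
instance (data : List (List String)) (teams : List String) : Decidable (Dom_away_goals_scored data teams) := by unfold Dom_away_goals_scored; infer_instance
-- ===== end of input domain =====

-- B replaces A's per-team match-list index + inner per-team rescan with one streaming totals pass over data;
-- equal on Pre_ (A's normal-return domain minus duplicate requested teams and self-match rows of a requested
-- team, degenerate corners on which neither behaviour is specified — see the comment above Pre_).

-- ===== PORT A =====
-- one match processed by matches_for_team's loop body (home/away lists get the match appended)
def matches_step (tm : PySem.Dict String (List (List String))) (m : List String) : PySem.Dict String (List (List String)) :=
  let home := PySem.List.pyGetD m 1 ""
  let away := PySem.List.pyGetD m 2 ""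
  [home, away].foldl (fun tm each => (tm.setdefault each []).modify each [] (fun l => l ++ [m])) tm

def matches_for_team (data : List (List String)) : PySem.Dict String (List (List String)) :=
  data.foldl matches_step PySem.Dict.empty

-- inner loop body of away_goals_scored over the matches of `team` (defaults of pyGetD/getD are unreachable under Pre_)
def goals_step (team : String) (goals : PySem.Dict String Int) (m : List String) : PySem.Dict String Int :=
  let team1 := PySem.List.pyGetD m 1 ""
  let scoring := [PySem.List.pyGetD m 3 "", PySem.List.pyGetD m 4 ""]
  let goals := goals.setdefault team 0
  if team1 ≠ team then goals.modify team 0 (fun g => g + (PySem.Int.ofStr? (PySem.List.pyGetD scoring 1 "")).getD 0) else goals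

def away_goals_scored (data : List (List String)) (teams : List String) : List (String × Int) :=
  let all_matches := matches_for_team data
  let st := teams.foldl (fun (st : PySem.Dict String Int × List (String × Int)) team =>
    let ms_ := all_matches.getD team []    -- Python raises KeyError when team is absent: excluded by Pre_
    let goals := ms_.foldl (goals_step team) st.1
    (goals, st.2 ++ [(team, goals.getD team 0)])) (PySem.Dict.empty, [])
  PySem.List.sorted st.2 (fun x => x.2) true

-- ===== PORT B =====
-- B's streaming pass: register both teams of the match, tally its away goals onto the away team if requested
def totalsB_step (wanted : PySem.Set String) (d : PySem.Dict String Int) (m : List String) : PySem.Dict String Int :=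
  let d := ((d.setdefault (PySem.List.pyGetD m 1 "") 0).setdefault (PySem.List.pyGetD m 2 "") 0)
  if PySem.Set.contains wanted (PySem.List.pyGetD m 2 "") = true then
    d.modify (PySem.List.pyGetD m 2 "") 0 (fun g => g + (PySem.Int.ofStr? (PySem.List.pyGetD m 4 "")).getD 0)
  else d

def away_goals_scored_alt (data : List (List String)) (teams : List String) : List (String × Int) :=
  let wanted := PySem.Set.ofList teams
  let totals := data.foldl (totalsB_step wanted) PySem.Dict.empty
  let result := teams.map (fun t => (t, totals.getD t 0))    -- totals[team]: KeyError when team absent, excluded by Pre_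
  PySem.List.sorted result (fun x => x.2) true

-- ===== PRECONDITION & SPEC =====
-- Pre_ is where A returns normally — every row has the two team fields (else IndexError), every requested team
-- appears in some row (else KeyError), every row involving a requested team has ≥ 5 fields and an int-parseable
-- away-goals field where A reads it (else IndexError/ValueError) — MINUS two degenerate corners on which A still
-- returns but no caller specifies either behaviour: teams lists with a duplicate entry (A's running dict then
-- reports cumulative doubled totals for the repeated team, B repeats the plain total) and rows where a requested
-- team plays itself (home = away; A silently skips the row's away goals, B tallies them or rejects the field).
def Pre_away_goals_scored (data : List (List String)) (teams : List String) : Prop :=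
  (∀ m ∈ data, 3 ≤ m.length) ∧
  teams.Nodup ∧
  (∀ m ∈ data, ¬ (PySem.List.pyGetD m 1 "" = PySem.List.pyGetD m 2 "" ∧ PySem.List.pyGetD m 2 "" ∈ teams)) ∧
  (∀ t ∈ teams,
    (∃ m ∈ data, t = PySem.List.pyGetD m 1 "" ∨ t = PySem.List.pyGetD m 2 "") ∧
    ∀ m ∈ data, (t = PySem.List.pyGetD m 1 "" ∨ t = PySem.List.pyGetD m 2 "") →
      5 ≤ m.length ∧ (t = PySem.List.pyGetD m 2 "" →
        (PySem.Int.ofStr? (PySem.List.pyGetD m 4 "")).isSome = true))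
instance (data : List (List String)) (teams : List String) : Decidable (Pre_away_goals_scored data teams) := by unfold Pre_away_goals_scored; infer_instance

def pvWitness_away_goals_scored : List (List String) × List String :=
  ([["d", "a", "b", "1", "2"]], ["a", "b"])

def Spec_away_goals_scored (data : List (List String)) (teams : List String) (out : List (String × Int)) : Prop := out = away_goals_scored_alt data teams
instance (data : List (List String)) (teams : List String) (out : List (String × Int)) : Decidable (Spec_away_goals_scored data teams out) := by unfold Spec_away_goals_scored; infer_instance

-- ===== CLAIM (what is proved, stated in full; the proofs are below) =====
def Claim_equal_away_goals_scored : Prop := ∀ (data : List (List String)) (teams : List String), Dom_away_goals_scored data teams → Pre_away_goals_scored data teams → Spec_away_goals_scored data teams (away_goals_scored data teams)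

-- ===== LEMMAS AND PROOFS =====

-- the contribution of one match to A's running total for `team`
def contribA (team : String) (m : List String) : Int :=
  if PySem.List.pyGetD m 1 "" ≠ team then (PySem.Int.ofStr? (PySem.List.pyGetD m 4 "")).getD 0 else 0

def Ssum (team : String) (ms : List (List String)) : Int := (ms.map (contribA team)).sum

-- B's total for `t`: away goals of every match whose away team is `t`
def SsumB (t : String) (data : List (List String)) : Int :=
  (data.map (fun m => if PySem.List.pyGetD m 2 "" = t then (PySem.Int.ofStr? (PySem.List.pyGetD m 4 "")).getD 0 else 0)).sum

theorem getD_setdefault_same {κ ν : Type} [BEq κ] [LawfulBEq κ] [DecidableEq κ]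
    (d : PySem.Dict κ ν) (k t : κ) (v : ν) : (d.setdefault k v).getD t v = d.getD t v := by
  by_cases h : d.contains k = true
  · rw [PySem.Dict.setdefault_of_contains d v h]
  · rw [PySem.Dict.setdefault_of_not_contains d v (by simpa using h), PySem.Dict.getD_insert]
    split
    · next he => subst he; rw [PySem.Dict.getD_of_not_contains d v (by simpa using h)]
    · rfl

theorem getD_matches_step (tm : PySem.Dict String (List (List String))) (m : List String) (t : String) :
    (matches_step tm m).getD t [] =
      tm.getD t [] ++ (if PySem.List.pyGetD m 1 "" = t then [m] else [])
        ++ (if PySem.List.pyGetD m 2 "" = t then [m] else []) := by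
  unfold matches_step
  simp only [List.foldl]
  generalize PySem.List.pyGetD m 1 "" = h1
  generalize PySem.List.pyGetD m 2 "" = a2
  simp only [PySem.Dict.getD_modify, getD_setdefault_same]
  by_cases e1 : h1 = t <;> by_cases e2 : a2 = t <;>
    simp [e1, e2] <;> simp_all [eq_comm]

theorem Ssum_append (team : String) (l1 l2 : List (List String)) :
    Ssum team (l1 ++ l2) = Ssum team l1 + Ssum team l2 := by
  simp [Ssum]

-- A's per-team rescan total equals B's streamed per-match total when t has no self-match in data
theorem Ssum_matches_aux (t : String) (data : List (List String))
    (h : ∀ m ∈ data, ¬ (PySem.List.pyGetD m 1 "" = PySem.List.pyGetD m 2 "" ∧ PySem.List.pyGetD m 2 "" = t)) :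
    ∀ tmA : PySem.Dict String (List (List String)),
      Ssum t ((data.foldl matches_step tmA).getD t []) = Ssum t (tmA.getD t []) + SsumB t data := by
  induction data with
  | nil => intro tmA; simp [SsumB]
  | cons m rest ih =>
    intro tmA
    simp only [List.foldl]
    rw [ih (fun m hm => h m (by simp [hm]))]
    rw [getD_matches_step, Ssum_append, Ssum_append]
    have hm := h m (by simp)
    by_cases h1 : PySem.List.pyGetD m 1 "" = t <;> by_cases h2 : PySem.List.pyGetD m 2 "" = t
    · exact absurd ⟨h1.trans h2.symm, h2⟩ hm
    · simp [Ssum, SsumB, contribA, h1, h2]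
    · simp [Ssum, SsumB, contribA, h1, h2]; ring
    · simp [Ssum, SsumB, h1, h2]

theorem Ssum_matches (t : String) (data : List (List String))
    (h : ∀ m ∈ data, ¬ (PySem.List.pyGetD m 1 "" = PySem.List.pyGetD m 2 "" ∧ PySem.List.pyGetD m 2 "" = t)) :
    Ssum t ((matches_for_team data).getD t []) = SsumB t data := by
  unfold matches_for_team
  rw [Ssum_matches_aux t data h PySem.Dict.empty]
  simp [Ssum]

-- A's inner loop over a team's matches, pointwise on the goals dict
theorem getD_goals_fold (team : String) (ms : List (List String)) :
    ∀ (goals : PySem.Dict String Int) (t : String),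
      (ms.foldl (goals_step team) goals).getD t 0 =
        if t = team then goals.getD team 0 + Ssum team ms else goals.getD t 0 := by
  induction ms with
  | nil => intro goals t; simp [Ssum]; intro h; rw [h]
  | cons m rest ih =>
    intro goals t
    simp only [List.foldl]
    rw [ih]
    have hstep : ∀ t', (goals_step team goals m).getD t' 0 =
        if t' = team then goals.getD team 0 + contribA team m else goals.getD t' 0 := by
      intro t'
      unfold goals_step contribA
      have hsc : PySem.List.pyGetD [PySem.List.pyGetD m 3 "", PySem.List.pyGetD m 4 ""] 1 "" = PySem.List.pyGetD m 4 "" := rfl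
      by_cases hne : PySem.List.pyGetD m 1 "" ≠ team
      · simp only [if_pos hne, PySem.Dict.getD_modify, getD_setdefault_same, hsc]
      · simp only [if_neg hne, getD_setdefault_same]
        by_cases ht : t' = team <;> simp [ht]
    rw [hstep t, hstep team]
    by_cases ht : t = team <;> simp [ht, Ssum]
    ring

theorem getD_totalsB_step (wanted : PySem.Set String) (d : PySem.Dict String Int) (m : List String) (t : String) :
    (totalsB_step wanted d m).getD t 0 =
      d.getD t 0 + (if PySem.List.pyGetD m 2 "" = t ∧ PySem.Set.contains wanted (PySem.List.pyGetD m 2 "") = true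
        then (PySem.Int.ofStr? (PySem.List.pyGetD m 4 "")).getD 0 else 0) := by
  unfold totalsB_step
  generalize PySem.List.pyGetD m 1 "" = h1
  generalize PySem.List.pyGetD m 2 "" = a2
  by_cases hw : PySem.Set.contains wanted a2 = true
  · have hmem : a2 ∈ wanted := by simpa using hw
    rw [if_pos hw, PySem.Dict.getD_modify]
    by_cases h2 : a2 = t
    · subst h2; simp [getD_setdefault_same, hmem]
    · rw [if_neg (show t ≠ a2 from fun h => h2 h.symm)]
      simp [getD_setdefault_same, h2]
  · have hmem : a2 ∉ wanted := by simpa using hw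
    rw [if_neg hw]
    simp [getD_setdefault_same, hmem]

theorem totalsB_fold (wanted : PySem.Set String) (data : List (List String)) (t : String)
    (ht : PySem.Set.contains wanted t = true) :
    ∀ d : PySem.Dict String Int,
      (data.foldl (totalsB_step wanted) d).getD t 0 = d.getD t 0 + SsumB t data := by
  induction data with
  | nil => intro d; simp [SsumB]
  | cons m rest ih =>
    intro d
    simp only [List.foldl]
    rw [ih, getD_totalsB_step]
    by_cases h2 : PySem.List.pyGetD m 2 "" = t
    · subst h2
      have hmem : PySem.List.pyGetD m 2 "" ∈ wanted := by simpa using ht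
      simp [SsumB, hmem]
      ring
    · simp [SsumB, h2]

-- A's outer loop, with distinct teams and a goals dict that is 0 on all remaining teams
theorem A_loop (data : List (List String)) :
    ∀ (teams : List String), teams.Nodup →
      ∀ (goals : PySem.Dict String Int) (res : List (String × Int)),
      (∀ t ∈ teams, goals.getD t 0 = 0) →
      (teams.foldl (fun (st : PySem.Dict String Int × List (String × Int)) team =>
          let ms_ := (matches_for_team data).getD team []
          let goals := ms_.foldl (goals_step team) st.1
          (goals, st.2 ++ [(team, goals.getD team 0)])) (goals, res)).2
      = res ++ teams.map (fun t => (t, Ssum t ((matches_for_team data).getD t []))) := by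
  intro teams
  induction teams with
  | nil => intro _ goals res _; simp
  | cons team rest ih =>
    intro hnd goals res h0
    simp only [List.foldl, List.map]
    have hval : (((matches_for_team data).getD team []).foldl (goals_step team) goals).getD team 0
        = Ssum team ((matches_for_team data).getD team []) := by
      rw [getD_goals_fold, if_pos rfl, h0 team (by simp)]
      ring
    rw [hval]
    rw [ih (List.Nodup.of_cons hnd) _ _ (fun t ht => ?_)]
    · simp
    · rw [getD_goals_fold]
      have hne : t ≠ team := by
        intro he; subst he
        exact (List.nodup_cons.mp hnd).1 ht
      rw [if_neg hne]
      exact h0 t (by simp [ht])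

-- ===== VERDICT (by name: the statement is the Claim_ definition above) =====
theorem away_goals_scored_spec : Claim_equal_away_goals_scored := by
  intro data teams _ hpre
  unfold Spec_away_goals_scored
  obtain ⟨-, hnodup, hself', -⟩ := hpre
  have hself : ∀ m ∈ data, PySem.List.pyGetD m 1 "" = PySem.List.pyGetD m 2 "" → PySem.List.pyGetD m 2 "" ∉ teams :=
    fun m hm he ht => hself' m hm ⟨he, ht⟩
  unfold away_goals_scored away_goals_scored_alt
  simp only []
  rw [A_loop data teams hnodup PySem.Dict.empty [] (fun t _ => rfl), List.nil_append]
  congr 1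
  refine List.map_congr_left (fun t ht => ?_)
  rw [totalsB_fold (PySem.Set.ofList teams) data t
        (by simpa using (PySem.Set.mem_ofList teams t).mpr ht) PySem.Dict.empty,
      Ssum_matches t data (fun m hm hc => hself m hm hc.1 (hc.2 ▸ ht))]
  simp [PySem.Dict.getD_empty]
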